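-- pv_equiv track=rewrite | github.com/RCF-117/MemSLM | llm_long_memory/memory/mid_memory.py | _role_hist
-- ===== SOURCE A (Python) =====
-- from typing import Any, Dict, List, Optional, Sequence
--
-- def _role_hist(roles: Sequence[str]) -> List[str]:
--     counts: Dict[str, int] = {}
--     first_index: Dict[str, int] = {}
--     for idx, role in enumerate(roles):
--         r = str(role or "").strip().lower() or "user"
--         counts[r] = counts.get(r, 0) + 1
--         if r not in first_index:
--             first_index[r] = idx
--     ordered = sorted(
--         counts.keys(),
--         key=lambda x: (-counts[x], first_index[x]),
--     )
--     return ordered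
-- ===== SOURCE B (Python) =====
-- from typing import Dict, List, Sequence
--
-- def _role_hist(roles: Sequence[str]) -> List[str]:
--     # Bucket (counting) sort by frequency, first-appearance order within a tier.
--     counts: Dict[str, int] = {}
--     order: List[str] = []
--     for role in roles:
--         r = str(role or "").strip().lower() or "user"
--         c = counts.get(r, 0)
--         if c == 0:
--             order.append(r)
--         counts[r] = c + 1
--     maxc = max((counts[r] for r in order), default=0)
--     buckets: List[List[str]] = [[] for _ in range(maxc + 1)]
--     for r in order:
--         buckets[counts[r]].append(r)
--     out: List[str] = []
--     for bucket in reversed(buckets[1:]):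
--         out.extend(bucket)
--     return out
-- ===== Notes on version B (the rewrite author's own statement) =====
-- stated objective: alternative
-- what changed: Replaces the comparison sort over the tuple key (-count, first_index) by a counting/bucket sort: one pass records counts and first-appearance order, roles are dropped into buckets indexed by their count, and the buckets are concatenated from highest count down, which yields first-appearance order within each frequency tier without any comparison sort or first_index map.
import Mathlib
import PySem

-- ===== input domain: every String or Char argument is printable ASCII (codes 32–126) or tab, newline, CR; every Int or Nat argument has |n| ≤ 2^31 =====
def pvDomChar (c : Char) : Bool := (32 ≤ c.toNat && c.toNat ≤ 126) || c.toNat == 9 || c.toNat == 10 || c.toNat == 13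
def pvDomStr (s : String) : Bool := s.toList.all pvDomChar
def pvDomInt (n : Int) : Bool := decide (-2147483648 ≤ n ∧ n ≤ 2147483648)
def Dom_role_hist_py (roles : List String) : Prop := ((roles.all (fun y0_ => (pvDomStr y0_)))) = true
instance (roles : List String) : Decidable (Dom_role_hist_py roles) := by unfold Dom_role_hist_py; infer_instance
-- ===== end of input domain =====

-- B replaces A's comparison sort on the tuple key (-count, first_index) by a counting/bucket
-- sort over first-appearance order; equivalence of the two is proved below (objective: alternative).


-- shared normalization: str(role or "").strip().lower() or "user"
-- (`str(role or "")` is `role` itself for every str argument, since `"" or ""` is "")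
def pvNorm (role : String) : String :=
  let r := PySem.Str.lower (PySem.Str.strip role)
  if r == "" then "user" else r

-- ===== PORT A =====
-- one iteration of A's `for idx, role in enumerate(roles)` loop over the state (counts, first_index)
def pvAStep (st : PySem.Dict String Int × PySem.Dict String Int) (p : Int × String) :
    PySem.Dict String Int × PySem.Dict String Int :=
  let r := pvNorm p.2
  (st.1.insert r (st.1.getD r 0 + 1),
   if st.2.contains r then st.2 else st.2.insert r p.1)

def role_hist_py (roles : List String) : List String :=
  let st := (PySem.List.enumerate roles).foldl pvAStep (PySem.Dict.empty, PySem.Dict.empty)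
  -- counts[x] / first_index[x]: the key is always present, so getD _ 0 is exact
  PySem.List.sorted2 st.1.keys (fun x => -(st.1.getD x 0)) (fun x => st.2.getD x 0)

-- ===== PORT B =====
-- one iteration of B's first loop over the state (counts, order)
def pvBStep (st : PySem.Dict String Int × List String) (role : String) :
    PySem.Dict String Int × List String :=
  let r := pvNorm role
  let c := st.1.getD r 0
  (st.1.insert r (c + 1), if c == 0 then st.2 ++ [r] else st.2)

def role_hist_py_alt (roles : List String) : List String :=
  let st := roles.foldl pvBStep (PySem.Dict.empty, [])
  let counts := st.1
  let order := st.2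
  let maxc := PySem.List.maxD (order.map (fun r => counts.getD r 0)) (fun x => x) 0
  -- buckets[counts[r]].append(r): counts[r] ∈ [1, maxc] for r in order, so plain Nat indexing is exact
  let buckets := order.foldl
    (fun (bs : List (List String)) r =>
      bs.set (counts.getD r 0).toNat (bs.getD (counts.getD r 0).toNat [] ++ [r]))
    (List.replicate (maxc + 1).toNat [])
  -- for bucket in reversed(buckets[1:]): out.extend(bucket)   (buckets[1:] = drop 1, exact)
  ((buckets.drop 1).reverse).foldl (fun out b => out ++ b) []

-- ===== PRECONDITION & SPEC =====
def Spec_role_hist_py (roles : List String) (out : List String) : Prop := out = role_hist_py_alt roles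
instance (roles : List String) (out : List String) : Decidable (Spec_role_hist_py roles out) := by unfold Spec_role_hist_py; infer_instance

-- ===== CLAIM (what is proved, stated in full; the proofs are below) =====
def Claim_equal_role_hist_py : Prop := ∀ (roles : List String), Dom_role_hist_py roles → Spec_role_hist_py roles (role_hist_py roles)

-- ===== LEMMAS AND PROOFS =====

-- abstract insertion-sort facts -------------------------------------------------

theorem pv_insertBy_pairwise {α : Type} (bf : α → α → Bool)
    (htrans : ∀ a b c, bf a b = true → bf b c = true → bf a c = true)
    (x : α) (acc : List α)
    (hacc : acc.Pairwise (fun a b => bf a b = true))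
    (ht : ∀ y ∈ acc, bf x y = true ∨ bf y x = true) :
    (PySem.List.insertBy bf x acc).Pairwise (fun a b => bf a b = true) := by
  induction acc with
  | nil => simp [PySem.List.insertBy]
  | cons y ys ih =>
    simp only [PySem.List.insertBy]
    rcases List.pairwise_cons.mp hacc with ⟨hy, hys⟩
    split
    · rename_i hxy
      refine List.pairwise_cons.mpr ⟨?_, hacc⟩
      intro z hz
      rcases List.mem_cons.mp hz with rfl | hz
      · exact hxy
      · exact htrans _ _ _ hxy (hy z hz)
    · rename_i hxy
      refine List.pairwise_cons.mpr ⟨?_, ih hys (fun z hz => ht z (List.mem_cons_of_mem _ hz))⟩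
      intro z hz
      rcases (PySem.List.mem_insertBy bf x z ys).mp hz with rfl | hz
      · rcases ht y (List.mem_cons_self) with h | h
        · exact absurd h hxy
        · exact h
      · exact hy z hz

theorem pv_foldl_insertBy_pairwise {α : Type} (bf : α → α → Bool)
    (htrans : ∀ a b c, bf a b = true → bf b c = true → bf a c = true) :
    ∀ (l acc : List α), l.Nodup → acc.Pairwise (fun a b => bf a b = true) →
    (∀ x ∈ l, ∀ y ∈ acc, bf x y = true ∨ bf y x = true) →
    (∀ x ∈ l, ∀ y ∈ l, x ≠ y → bf x y = true ∨ bf y x = true) →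
    (l.foldl (fun acc x => PySem.List.insertBy bf x acc) acc).Pairwise (fun a b => bf a b = true) := by
  intro l
  induction l with
  | nil => intro acc _ hacc _ _; simpa using hacc
  | cons x t ih =>
    intro acc hnd hacc hcross htot
    simp only [List.foldl_cons]
    rcases List.nodup_cons.mp hnd with ⟨hxnot, hndt⟩
    refine ih _ hndt
      (pv_insertBy_pairwise bf htrans x acc hacc (fun y hy => hcross x List.mem_cons_self y hy))
      ?_ ?_
    · intro z hz y hy
      rcases (PySem.List.mem_insertBy bf x y acc).mp hy with rfl | hy
      · exact htot z (List.mem_cons_of_mem _ hz) y List.mem_cons_self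
          (fun h => hxnot (h ▸ hz))
      · exact hcross z (List.mem_cons_of_mem _ hz) y hy
    · intro a ha b hb hab
      exact htot a (List.mem_cons_of_mem _ ha) b (List.mem_cons_of_mem _ hb) hab

theorem pv_eq_of_perm_pairwise {α : Type} (R : α → α → Prop)
    (hasym : ∀ a b, R a b → R b a → False) :
    ∀ (l₁ l₂ : List α), l₁.Perm l₂ → l₁.Pairwise R → l₂.Pairwise R → l₁ = l₂ := by
  intro l₁
  induction l₁ with
  | nil => intro l₂ hp _ _; exact (hp.nil_eq).symm ▸ rfl
  | cons a t₁ ih =>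
    intro l₂ hp h₁ h₂
    cases l₂ with
    | nil => exact absurd hp.symm.nil_eq (by simp)
    | cons b t₂ =>
      rcases List.pairwise_cons.mp h₁ with ⟨ha, ht₁⟩
      rcases List.pairwise_cons.mp h₂ with ⟨hb, ht₂⟩
      by_cases hab : a = b
      · subst hab
        exact congrArg (a :: ·) (ih t₂ hp.cons_inv ht₁ ht₂)
      · have ha2 : a ∈ t₂ := by
          have := hp.mem_iff.mp (List.mem_cons_self (a := a))
          rcases List.mem_cons.mp this with h | h
          · exact absurd h hab
          · exact h
        have hb1 : b ∈ t₁ := by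
          have := hp.symm.mem_iff.mp (List.mem_cons_self (a := b))
          rcases List.mem_cons.mp this with h | h
          · exact absurd h.symm hab
          · exact h
        exact absurd (ha b hb1) (fun h => hasym a b h (hb a ha2))

-- the concrete order --------------------------------------------------------

-- R a b : "a strictly precedes b" under the key (-count, first_index)
def pvR (cnt : String → Nat) (idx : String → Int) (a b : String) : Prop :=
  cnt b < cnt a ∨ (cnt a = cnt b ∧ idx a < idx b)

theorem pvR_asym (cnt : String → Nat) (idx : String → Int) :
    ∀ a b, pvR cnt idx a b → pvR cnt idx b a → False := by
  intro a b h1 h2; unfold pvR at *; omega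

-- A's loop: combined invariant over the state (counts, first_index)
set_option maxHeartbeats 2000000 in
theorem pv_aLoop_spec : ∀ (l : List String) (s : Int) (c f : PySem.Dict String Int),
    f.keys = c.keys → c.keys.Nodup →
    (∀ p ∈ f.items, p.2 < s) → f.items.Pairwise (fun p q => p.2 < q.2) →
    ((PySem.List.enumerate l s).foldl pvAStep (c, f)).2.keys
      = ((PySem.List.enumerate l s).foldl pvAStep (c, f)).1.keys ∧
    ((PySem.List.enumerate l s).foldl pvAStep (c, f)).1.keys.Nodup ∧
    ((PySem.List.enumerate l s).foldl pvAStep (c, f)).1.keys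
      = PySem.Set.update c.keys (l.map pvNorm) ∧
    (∀ r, ((PySem.List.enumerate l s).foldl pvAStep (c, f)).1.getD r 0
      = c.getD r 0 + ((l.map pvNorm).count r : Int)) ∧
    (∀ p ∈ ((PySem.List.enumerate l s).foldl pvAStep (c, f)).2.items, p.2 < s + l.length) ∧
    ((PySem.List.enumerate l s).foldl pvAStep (c, f)).2.items.Pairwise (fun p q => p.2 < q.2) := by
  intro l
  induction l with
  | nil =>
    intro s c f hk hn hb hp
    refine ⟨hk, hn, rfl, ?_, ?_, hp⟩
    · intro r; simp [PySem.List.enumerate]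
    · intro p hpm; have := hb p hpm; simp only [List.length_nil]; omega
  | cons x t ih =>
    intro s c f hk hn hb hp
    rw [PySem.List.enumerate_cons]
    simp only [List.foldl_cons]
    have hstep : pvAStep (c, f) (s, x) =
        (c.insert (pvNorm x) (c.getD (pvNorm x) 0 + 1),
         if f.contains (pvNorm x) then f else f.insert (pvNorm x) s) := rfl
    rw [hstep]
    have hcc : c.contains (pvNorm x) = decide ((pvNorm x) ∈ c.keys) :=
      PySem.Dict.contains_eq_decide_mem_keys c _
    have hfc : f.contains (pvNorm x) = decide ((pvNorm x) ∈ c.keys) := by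
      rw [PySem.Dict.contains_eq_decide_mem_keys f _, hk]
    by_cases hmem : (pvNorm x) ∈ c.keys
    · -- seen before: counts overwritten in place, first_index unchanged
      rw [hfc, if_pos (by simpa using hmem)]
      have hck : (c.insert (pvNorm x) (c.getD (pvNorm x) 0 + 1)).keys = c.keys :=
        PySem.Dict.keys_insert_of_contains c _ (by rw [hcc]; simpa using hmem)
      obtain ⟨ik, inn, iku, icnt, ib, ip⟩ :=
        ih (s+1) (c.insert (pvNorm x) (c.getD (pvNorm x) 0 + 1)) f
          (by rw [hk, hck]) (by rw [hck]; exact hn)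
          (fun p hpm => by have := hb p hpm; omega) hp
      refine ⟨ik, inn, ?_, ?_, ?_, ip⟩
      · rw [iku, hck]
        have : PySem.Set.add c.keys (pvNorm x) = c.keys := by
          simp [PySem.Set.add, hmem]
        simp [PySem.Set.update, List.map_cons, this]
      · intro r'
        rw [icnt r', PySem.Dict.getD_insert]
        by_cases h : r' = pvNorm x
        · subst h
          rw [if_pos rfl]
          have hcnt : (List.map pvNorm (x :: t)).count (pvNorm x)
              = (List.map pvNorm t).count (pvNorm x) + 1 := by
            simp
          rw [hcnt]; push_cast; ring
        · rw [if_neg h]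
          have hbe : (pvNorm x == r') = false := by simpa using fun hh => h hh.symm
          have hcnt : (List.map pvNorm (x :: t)).count r' = (List.map pvNorm t).count r' := by
            simp [List.count_cons, hbe]
          rw [hcnt]
      · intro p hpm
        have hlt := ib p hpm
        simp only [List.length_cons]
        omega
    · -- new role: appended to both dicts
      rw [hfc, if_neg (by simpa using hmem)]
      have hcf : c.contains (pvNorm x) = false := by rw [hcc]; simpa using hmem
      have hff : f.contains (pvNorm x) = false := by
        rw [PySem.Dict.contains_eq_decide_mem_keys f _, hk]; simpa using hmem
      have hck : (c.insert (pvNorm x) (c.getD (pvNorm x) 0 + 1)).keys = c.keys ++ [pvNorm x] :=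
        PySem.Dict.keys_insert_of_not_contains c _ hcf
      have hfitems : (f.insert (pvNorm x) s).items = f.items ++ [(pvNorm x, s)] :=
        PySem.Dict.items_insert_of_not_contains f _ hff
      obtain ⟨ik, inn, iku, icnt, ib, ip⟩ :=
        ih (s+1) (c.insert (pvNorm x) (c.getD (pvNorm x) 0 + 1)) (f.insert (pvNorm x) s)
          (by rw [PySem.Dict.keys_insert_of_not_contains f _ hff, hck, hk])
          (by rw [hck]
              rw [List.nodup_append]
              refine ⟨hn, by simp, ?_⟩
              simp only [List.mem_singleton, forall_eq]
              intro a ha h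
              exact hmem (h ▸ ha))
          (by intro p hpm
              rw [hfitems] at hpm
              rcases List.mem_append.mp hpm with h | h
              · have := hb p h; omega
              · obtain rfl := List.mem_singleton.mp h
                show s < s + 1
                omega)
          (by rw [hfitems]
              refine List.pairwise_append.mpr ⟨hp, by simp, ?_⟩
              intro p hpm q hq
              simp at hq
              have := hb p hpm
              rw [hq]; exact this)
      refine ⟨ik, inn, ?_, ?_, ?_, ip⟩
      · rw [iku, hck]
        have : PySem.Set.add c.keys (pvNorm x) = c.keys ++ [pvNorm x] := by
          simp [PySem.Set.add, hmem]
        simp [PySem.Set.update, List.map_cons, this]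
      · intro r'
        rw [icnt r', PySem.Dict.getD_insert]
        by_cases h : r' = pvNorm x
        · subst h
          rw [if_pos rfl]
          have hcnt : (List.map pvNorm (x :: t)).count (pvNorm x)
              = (List.map pvNorm t).count (pvNorm x) + 1 := by
            simp
          rw [hcnt]; push_cast; ring
        · rw [if_neg h]
          have hbe : (pvNorm x == r') = false := by simpa using fun hh => h hh.symm
          have hcnt : (List.map pvNorm (x :: t)).count r' = (List.map pvNorm t).count r' := by
            simp [List.count_cons, hbe]
          rw [hcnt]
      · intro p hpm
        have hlt := ib p hpm
        simp only [List.length_cons]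
        omega

-- B's first loop: counts and first-appearance order
set_option maxHeartbeats 8000000 in
theorem pv_bLoop_spec : ∀ (l : List String) (c : PySem.Dict String Int) (ord : List String),
    (∀ r, 0 ≤ c.getD r 0) → (∀ r, r ∈ ord ↔ c.getD r 0 ≠ 0) →
    (∀ r, (l.foldl pvBStep (c, ord)).1.getD r 0 = c.getD r 0 + ((l.map pvNorm).count r : Int)) ∧
    (l.foldl pvBStep (c, ord)).2 = PySem.Set.update ord (l.map pvNorm) := by
  intro l
  induction l with
  | nil =>
    intro c ord hpos hiff
    refine ⟨fun r => by simp, rfl⟩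
  | cons x t ih =>
    intro c ord hpos hiff
    simp only [List.foldl_cons]
    have hstep : pvBStep (c, ord) x =
        (c.insert (pvNorm x) (c.getD (pvNorm x) 0 + 1),
         if c.getD (pvNorm x) 0 == 0 then ord ++ [pvNorm x] else ord) := rfl
    rw [hstep]
    have hord' : (if c.getD (pvNorm x) 0 == 0 then ord ++ [pvNorm x] else ord)
        = PySem.Set.add ord (pvNorm x) := by
      by_cases h : c.getD (pvNorm x) 0 = 0
      · have hmem : pvNorm x ∉ ord := fun hm => (hiff (pvNorm x)).mp hm h
        have hcont : PySem.Set.contains ord (pvNorm x) = false := by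
          cases hcc : PySem.Set.contains ord (pvNorm x)
          · rfl
          · exact absurd ((PySem.Set.contains_iff ord (pvNorm x)).mp hcc) hmem
        rw [h]
        simp only [PySem.Set.add, hcont, Bool.false_eq_true, if_false, beq_self_eq_true, if_true]
      · have hmem : pvNorm x ∈ ord := (hiff (pvNorm x)).mpr h
        have hcont : PySem.Set.contains ord (pvNorm x) = true := (PySem.Set.contains_iff ord (pvNorm x)).mpr hmem
        have hb : (c.getD (pvNorm x) 0 == 0) = false := by simpa using h
        simp only [PySem.Set.add, hcont, if_true, hb, Bool.false_eq_true, if_false]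
    rw [hord']
    have hpos' : ∀ r, 0 ≤ (c.insert (pvNorm x) (c.getD (pvNorm x) 0 + 1)).getD r 0 := by
      intro r
      rw [PySem.Dict.getD_insert]
      by_cases h : r = pvNorm x
      · rw [if_pos h]; have := hpos (pvNorm x); omega
      · rw [if_neg h]; exact hpos r
    have hiff' : ∀ r, r ∈ PySem.Set.add ord (pvNorm x) ↔
        (c.insert (pvNorm x) (c.getD (pvNorm x) 0 + 1)).getD r 0 ≠ 0 := by
      intro r
      rw [PySem.Dict.getD_insert, PySem.Set.mem_add]
      by_cases h : r = pvNorm x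
      · subst h
        rw [if_pos rfl]
        have := hpos (pvNorm x)
        constructor
        · intro _; omega
        · intro _; exact Or.inr rfl
      · rw [if_neg h]
        rw [← hiff r]
        constructor
        · rintro (hh | rfl); exact hh; exact absurd rfl h
        · exact fun hh => Or.inl hh
    obtain ⟨icnt, iord⟩ := ih _ _ hpos' hiff'
    refine ⟨?_, ?_⟩
    · intro r'
      rw [icnt r', PySem.Dict.getD_insert]
      by_cases h : r' = pvNorm x
      · subst h
        rw [if_pos rfl]
        have hcnt : (List.map pvNorm (x :: t)).count (pvNorm x)
            = (List.map pvNorm t).count (pvNorm x) + 1 := by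
          simp
        rw [hcnt]; push_cast; ring
      · rw [if_neg h]
        have hbe : (pvNorm x == r') = false := by simpa using fun hh => h hh.symm
        have hcnt : (List.map pvNorm (x :: t)).count r' = (List.map pvNorm t).count r' := by
          simp [List.count_cons, hbe]
        rw [hcnt]
    · rw [iord]
      simp [PySem.Set.update, List.map_cons]

-- the bucket fold fills bucket i with exactly the elements of count i, in order
set_option maxHeartbeats 2000000 in
theorem pv_buckets_spec (cN : String → Nat) :
    ∀ (l : List String) (bs : List (List String)),
    (∀ r ∈ l, cN r < bs.length) →
    (l.foldl (fun bs r => bs.set (cN r) (bs.getD (cN r) [] ++ [r])) bs).length = bs.length ∧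
    ∀ i, (l.foldl (fun bs r => bs.set (cN r) (bs.getD (cN r) [] ++ [r])) bs).getD i []
      = bs.getD i [] ++ l.filter (fun r => cN r == i) := by
  intro l
  induction l with
  | nil => intro bs _; exact ⟨rfl, fun i => by simp⟩
  | cons x t ih =>
    intro bs hlt
    simp only [List.foldl_cons]
    obtain ⟨ilen, igd⟩ := ih (bs.set (cN x) (bs.getD (cN x) [] ++ [x]))
      (fun r hr => by rw [List.length_set]; exact hlt r (List.mem_cons_of_mem _ hr))
    refine ⟨by rw [ilen, List.length_set], ?_⟩
    intro i
    rw [igd i]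
    by_cases h : cN x = i
    · subst h
      have hget : (bs.set (cN x) (bs.getD (cN x) [] ++ [x])).getD (cN x) []
          = bs.getD (cN x) [] ++ [x] := by
        rw [List.getD_eq_getElem?_getD, List.getElem?_set_self (hlt x List.mem_cons_self)]
        rfl
      rw [hget]
      have : (x :: t).filter (fun r => cN r == cN x) = x :: t.filter (fun r => cN r == cN x) := by
        simp
      rw [this, List.append_assoc]
      rfl
    · have hget : (bs.set (cN x) (bs.getD (cN x) [] ++ [x])).getD i [] = bs.getD i [] := by
        rw [List.getD_eq_getElem?_getD, List.getElem?_set_ne h, ← List.getD_eq_getElem?_getD]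
      rw [hget]
      have hbe : (cN x == i) = false := by simpa using h
      have : (x :: t).filter (fun r => cN r == i) = t.filter (fun r => cN r == i) := by
        simp [hbe]
      rw [this]

theorem pvR_trans (cnt : String → Nat) (idx : String → Int) :
    ∀ a b c, pvR cnt idx a b → pvR cnt idx b c → pvR cnt idx a c := by
  intro a b c h1 h2; unfold pvR at *; omega

-- max(..., default=0) over a list of nonnegative ints bounds every element
theorem pv_maxD_spec (l : List Int) (h : ∀ v ∈ l, 0 ≤ v) :
    0 ≤ PySem.List.maxD l (fun x => x) 0 ∧ ∀ v ∈ l, v ≤ PySem.List.maxD l (fun x => x) 0 := by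
  cases l with
  | nil => simp [PySem.List.maxD, PySem.List.max?]
  | cons x t =>
    have hm : PySem.List.maxD (x :: t) (fun x => x) 0 = t.foldl max x := by
      simp [PySem.List.maxD, PySem.List.max?_id_cons]
    rw [hm]
    obtain ⟨h1, h2⟩ := PySem.List.le_foldl_max t x
    refine ⟨?_, ?_⟩
    · rcases PySem.List.foldl_max_mem t x with he | he
      · rw [he]; exact h x List.mem_cons_self
      · exact h _ (List.mem_cons_of_mem _ he)
    · intro v hv
      rcases List.mem_cons.mp hv with rfl | hv
      · exact h1
      · exact h2 v hv

-- the tier of roles appearing exactly i times, in first-appearance order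
def pvTier (rs ord : List String) (i : Nat) : List String :=
  ord.filter (fun r => rs.count r == i)

-- tiers m, m-1, ..., 1 concatenated
def pvOut (rs ord : List String) (m : Nat) : List String :=
  (((List.range m).map (fun i => pvTier rs ord (i + 1))).reverse).flatten

theorem pvOut_succ (rs ord : List String) (m : Nat) :
    pvOut rs ord (m + 1) = pvTier rs ord (m + 1) ++ pvOut rs ord m := by
  unfold pvOut
  rw [List.range_succ, List.map_append, List.reverse_append]
  simp

-- the concatenated tiers: a permutation of the ≤ m part of ord, strictly ordered under pvR
theorem pv_out_spec (rs ord : List String) (idx : String → Int)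
    (hpos : ∀ r ∈ ord, 1 ≤ rs.count r)
    (hord : ord.Pairwise (fun a b => idx a < idx b)) :
    ∀ m, (pvOut rs ord m).Perm (ord.filter (fun r => decide (rs.count r ≤ m))) ∧
      (pvOut rs ord m).Pairwise (pvR (fun r => rs.count r) idx) := by
  intro m
  induction m with
  | zero =>
    constructor
    · have h0 : ord.filter (fun r => decide (rs.count r ≤ 0)) = [] := by
        rw [List.filter_eq_nil_iff]
        intro r hr
        have := hpos r hr
        simp only [decide_eq_true_eq]
        omega
      rw [h0]
      exact List.Perm.refl _
    · exact List.Pairwise.nil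
  | succ m ih =>
    obtain ⟨iperm, ipair⟩ := ih
    rw [pvOut_succ]
    constructor
    · -- pvTier (m+1) ++ pvOut m  ~  filter (≤ m+1)
      have step1 : (pvTier rs ord (m+1) ++ pvOut rs ord m).Perm
          (pvTier rs ord (m+1) ++ ord.filter (fun r => decide (rs.count r ≤ m))) :=
        List.Perm.append_left _ iperm
      refine step1.trans ?_
      have hsplit := List.filter_append_perm (fun r => rs.count r == m + 1)
        (ord.filter (fun r => decide (rs.count r ≤ m + 1)))
      rw [List.filter_filter, List.filter_filter] at hsplit
      have e1 : ord.filter (fun a => (rs.count a == m + 1) && decide (rs.count a ≤ m + 1))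
          = pvTier rs ord (m+1) := by
        unfold pvTier
        refine List.filter_congr ?_
        intro r _
        by_cases h : rs.count r = m + 1
        · simp [h]
        · simp [h]
      have e2 : ord.filter (fun a => (!(rs.count a == m + 1)) && decide (rs.count a ≤ m + 1))
          = ord.filter (fun r => decide (rs.count r ≤ m)) := by
        refine List.filter_congr ?_
        intro r _
        by_cases h : rs.count r = m + 1
        · simp [h]
        · by_cases h2 : rs.count r ≤ m
          · simp [h, h2]; omega
          · simp [h, h2]; omega
      rw [e1, e2] at hsplit
      exact hsplit
    · -- pairwise
      refine List.pairwise_append.mpr ⟨?_, ipair, ?_⟩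
      · unfold pvTier
        rw [List.pairwise_filter]
        refine hord.imp_of_mem ?_
        intro a b _ _ hab ha hb
        right
        constructor
        · have ha' := of_decide_eq_true (by simpa using ha)
          have hb' := of_decide_eq_true (by simpa using hb)
          beta_reduce
          omega
        · exact hab
      · intro a ha b hb
        have ha' : rs.count a = m + 1 := by
          unfold pvTier at ha
          have := List.of_mem_filter ha
          simpa using this
        have hb' : rs.count b ≤ m := by
          have hmem := iperm.mem_iff.mp hb
          have := List.of_mem_filter hmem
          simpa using this
        left
        beta_reduce
        omega

-- proof-side names for the two loop states
def pvAState (roles : List String) : PySem.Dict String Int × PySem.Dict String Int :=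
  (PySem.List.enumerate roles).foldl pvAStep (PySem.Dict.empty, PySem.Dict.empty)

def pvBState (roles : List String) : PySem.Dict String Int × List String :=
  roles.foldl pvBStep (PySem.Dict.empty, [])

def pvM (roles : List String) : Int :=
  PySem.List.maxD ((pvBState roles).2.map (fun r => (pvBState roles).1.getD r 0)) (fun x => x) 0

def pvBuckets (roles : List String) : List (List String) :=
  (pvBState roles).2.foldl
    (fun bs r => bs.set ((pvBState roles).1.getD r 0).toNat
      (bs.getD ((pvBState roles).1.getD r 0).toNat [] ++ [r]))
    (List.replicate (pvM roles + 1).toNat [])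

theorem pv_getD_replicate (i n : Nat) : (List.replicate n ([] : List String)).getD i [] = [] := by
  rw [List.getD_eq_getElem?_getD]
  rcases lt_or_ge i n with h | h
  · rw [List.getElem?_eq_getElem (by simpa using h)]; simp
  · rw [List.getElem?_eq_none (by simpa using h)]; rfl

set_option maxHeartbeats 8000000 in
theorem pv_main (roles : List String) : role_hist_py roles = role_hist_py_alt roles := by
  -- A's loop, from the empty state
  obtain ⟨hAk, hAn, hAku, hAcnt, -, hAp⟩ :=
    pv_aLoop_spec roles 0 PySem.Dict.empty PySem.Dict.empty rfl
      (by rw [PySem.Dict.keys_empty]; exact List.nodup_nil)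
      (by intro p hp
          rw [show (PySem.Dict.empty : PySem.Dict String Int).items = [] from rfl] at hp
          cases hp)
      (by rw [show (PySem.Dict.empty : PySem.Dict String Int).items = [] from rfl]
          exact List.Pairwise.nil)
  have hOrd : (pvAState roles).1.keys = PySem.Set.ofList (roles.map pvNorm) := by
    rw [PySem.Dict.keys_empty] at hAku; exact hAku
  have hAcnt' : ∀ r, (pvAState roles).1.getD r 0 = (((roles.map pvNorm).count r : Nat) : Int) := by
    intro r
    have h := hAcnt r
    rw [PySem.Dict.getD_empty, zero_add] at h
    exact h
  have hOrdNodup : (PySem.Set.ofList (roles.map pvNorm)).Nodup := PySem.Set.nodup_ofList _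
  have hfk : (pvAState roles).2.keys = PySem.Set.ofList (roles.map pvNorm) := by
    have h : (pvAState roles).2.keys = (pvAState roles).1.keys := hAk
    rw [h, hOrd]
  have hOrdIdx : (PySem.Set.ofList (roles.map pvNorm)).Pairwise
      (fun a b => (pvAState roles).2.getD a 0 < (pvAState roles).2.getD b 0) := by
    have hfn : (pvAState roles).2.keys.Nodup := by rw [hfk]; exact hOrdNodup
    have hAp' : (pvAState roles).2.items.Pairwise (fun p q => p.2 < q.2) := hAp
    rw [PySem.Dict.items_eq_map_keys (pvAState roles).2 hfn (0 : Int), List.pairwise_map] at hAp'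
    rw [← hfk]
    exact hAp'
  -- B's loop, from the empty state
  obtain ⟨hBcnt, hBord⟩ := pv_bLoop_spec roles PySem.Dict.empty []
    (fun r => by rw [PySem.Dict.getD_empty])
    (fun r => by rw [PySem.Dict.getD_empty]; simp)
  have hBcnt' : ∀ r, (pvBState roles).1.getD r 0 = (((roles.map pvNorm).count r : Nat) : Int) := by
    intro r
    have h := hBcnt r
    rw [PySem.Dict.getD_empty, zero_add] at h
    exact h
  have hBord' : (pvBState roles).2 = PySem.Set.ofList (roles.map pvNorm) := hBord
  -- the maximum count
  have hvals : ∀ v ∈ (pvBState roles).2.map (fun r => (pvBState roles).1.getD r 0), 0 ≤ v := by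
    intro v hv
    obtain ⟨r, -, rfl⟩ := List.mem_map.mp hv
    rw [hBcnt']
    exact Int.natCast_nonneg _
  obtain ⟨hM0, hMle⟩ := pv_maxD_spec _ hvals
  have hM0' : 0 ≤ pvM roles := hM0
  have hMcast : pvM roles = ((pvM roles).toNat : Int) := (Int.toNat_of_nonneg hM0').symm
  have hcntle : ∀ r ∈ PySem.Set.ofList (roles.map pvNorm),
      (roles.map pvNorm).count r ≤ (pvM roles).toNat := by
    intro r hr
    have h1 : (pvBState roles).1.getD r 0 ≤ pvM roles :=
      hMle _ (List.mem_map.mpr ⟨r, by rw [hBord']; exact hr, rfl⟩)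
    rw [hBcnt', hMcast] at h1
    exact_mod_cast h1
  -- the buckets
  have hM1 : (pvM roles + 1).toNat = (pvM roles).toNat + 1 := by omega
  obtain ⟨hblen, hbget⟩ := pv_buckets_spec (fun r => ((pvBState roles).1.getD r 0).toNat)
    (pvBState roles).2 (List.replicate (pvM roles + 1).toNat [])
    (by intro r hr
        rw [List.length_replicate]
        have hle : (roles.map pvNorm).count r ≤ (pvM roles).toNat :=
          hcntle r (by rw [← hBord']; exact hr)
        have he : ((pvBState roles).1.getD r 0).toNat = (roles.map pvNorm).count r := by
          rw [hBcnt', Int.toNat_natCast]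
        beta_reduce
        rw [he, hM1]
        omega)
  have hbuck : ∀ i, (pvBuckets roles).getD i []
      = pvTier (roles.map pvNorm) (PySem.Set.ofList (roles.map pvNorm)) i := by
    intro i
    have h : (pvBuckets roles).getD i []
        = (List.replicate (pvM roles + 1).toNat ([] : List String)).getD i []
          ++ (pvBState roles).2.filter (fun r => ((pvBState roles).1.getD r 0).toNat == i) :=
      hbget i
    rw [pv_getD_replicate, List.nil_append] at h
    rw [h, hBord']
    unfold pvTier
    refine List.filter_congr ?_
    intro r _
    rw [hBcnt', Int.toNat_natCast]
  have hblen' : (pvBuckets roles).length = (pvM roles).toNat + 1 := by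
    have h : (pvBuckets roles).length
        = (List.replicate (pvM roles + 1).toNat ([] : List String)).length := hblen
    rw [List.length_replicate, hM1] at h
    exact h
  have hbexp : pvBuckets roles = (List.range ((pvM roles).toNat + 1)).map
      (fun i => pvTier (roles.map pvNorm) (PySem.Set.ofList (roles.map pvNorm)) i) := by
    refine List.ext_getElem (by rw [hblen']; simp) ?_
    intro i h1 h2
    have hgd : (pvBuckets roles)[i] = (pvBuckets roles).getD i [] := by
      rw [List.getD_eq_getElem?_getD, List.getElem?_eq_getElem h1]
      rfl
    rw [hgd, hbuck i, List.getElem_map, List.getElem_range]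
  -- B's result is the concatenated tiers
  have hBout : role_hist_py_alt roles
      = pvOut (roles.map pvNorm) (PySem.Set.ofList (roles.map pvNorm)) (pvM roles).toNat := by
    have h0 : role_hist_py_alt roles
        = ((pvBuckets roles).drop 1).reverse.foldl (fun out b => out ++ b) [] := rfl
    rw [h0, hbexp]
    have hdrop : ((List.range ((pvM roles).toNat + 1)).map
        (fun i => pvTier (roles.map pvNorm) (PySem.Set.ofList (roles.map pvNorm)) i)).drop 1
        = (List.range ((pvM roles).toNat)).map
          (fun i => pvTier (roles.map pvNorm) (PySem.Set.ofList (roles.map pvNorm)) (i + 1)) := by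
      rw [List.range_succ_eq_map]
      simp [List.map_map, Function.comp, Nat.succ_eq_add_one]
    rw [hdrop]
    have hfl := PySem.List.foldl_append_eq_flatMap (fun b => b)
      (((List.range ((pvM roles).toNat)).map
        (fun i => pvTier (roles.map pvNorm) (PySem.Set.ofList (roles.map pvNorm)) (i + 1))).reverse)
      ([] : List String)
    rw [hfl, List.nil_append]
    rw [show (fun (b : List String) => b) = @id (List String) from rfl, List.flatMap_id]
    rfl
  -- A's result is the insertion sort under bf
  have hAform : role_hist_py roles = (PySem.Set.ofList (roles.map pvNorm)).foldl
      (fun acc x => PySem.List.insertBy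
        (fun a b => decide ((fun x => -((pvAState roles).1.getD x 0)) a
            < (fun x => -((pvAState roles).1.getD x 0)) b)
          || (!decide ((fun x => -((pvAState roles).1.getD x 0)) b
              < (fun x => -((pvAState roles).1.getD x 0)) a)
              && decide ((fun x => (pvAState roles).2.getD x 0) a
                < (fun x => (pvAState roles).2.getD x 0) b))) x acc) [] := by
    rw [← hOrd]
    rfl
  have hbf_iff : ∀ a b,
      ((fun a b => decide ((fun x => -((pvAState roles).1.getD x 0)) a
            < (fun x => -((pvAState roles).1.getD x 0)) b)
          || (!decide ((fun x => -((pvAState roles).1.getD x 0)) b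
              < (fun x => -((pvAState roles).1.getD x 0)) a)
              && decide ((fun x => (pvAState roles).2.getD x 0) a
                < (fun x => (pvAState roles).2.getD x 0) b))) a b) = true
        ↔ pvR (fun r => (roles.map pvNorm).count r) (fun r => (pvAState roles).2.getD r 0) a b := by
    intro a b
    beta_reduce
    simp only [Bool.or_eq_true, Bool.and_eq_true, Bool.not_eq_true', decide_eq_true_eq,
      decide_eq_false_iff_not]
    rw [hAcnt' a, hAcnt' b]
    unfold pvR
    beta_reduce
    omega
  have hbf_trans : ∀ a b c,
      ((fun a b => decide ((fun x => -((pvAState roles).1.getD x 0)) a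
            < (fun x => -((pvAState roles).1.getD x 0)) b)
          || (!decide ((fun x => -((pvAState roles).1.getD x 0)) b
              < (fun x => -((pvAState roles).1.getD x 0)) a)
              && decide ((fun x => (pvAState roles).2.getD x 0) a
                < (fun x => (pvAState roles).2.getD x 0) b))) a b) = true →
      ((fun a b => decide ((fun x => -((pvAState roles).1.getD x 0)) a
            < (fun x => -((pvAState roles).1.getD x 0)) b)
          || (!decide ((fun x => -((pvAState roles).1.getD x 0)) b
              < (fun x => -((pvAState roles).1.getD x 0)) a)
              && decide ((fun x => (pvAState roles).2.getD x 0) a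
                < (fun x => (pvAState roles).2.getD x 0) b))) b c) = true →
      ((fun a b => decide ((fun x => -((pvAState roles).1.getD x 0)) a
            < (fun x => -((pvAState roles).1.getD x 0)) b)
          || (!decide ((fun x => -((pvAState roles).1.getD x 0)) b
              < (fun x => -((pvAState roles).1.getD x 0)) a)
              && decide ((fun x => (pvAState roles).2.getD x 0) a
                < (fun x => (pvAState roles).2.getD x 0) b))) a c) = true := by
    intro a b c h1 h2
    exact (hbf_iff a c).mpr (pvR_trans _ _ a b c ((hbf_iff a b).mp h1) ((hbf_iff b c).mp h2))
  have hS : (PySem.Set.ofList (roles.map pvNorm)).Pairwise (fun a b =>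
      ((fun a b => decide ((fun x => -((pvAState roles).1.getD x 0)) a
            < (fun x => -((pvAState roles).1.getD x 0)) b)
          || (!decide ((fun x => -((pvAState roles).1.getD x 0)) b
              < (fun x => -((pvAState roles).1.getD x 0)) a)
              && decide ((fun x => (pvAState roles).2.getD x 0) a
                < (fun x => (pvAState roles).2.getD x 0) b))) a b) = true ∨
      ((fun a b => decide ((fun x => -((pvAState roles).1.getD x 0)) a
            < (fun x => -((pvAState roles).1.getD x 0)) b)
          || (!decide ((fun x => -((pvAState roles).1.getD x 0)) b
              < (fun x => -((pvAState roles).1.getD x 0)) a)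
              && decide ((fun x => (pvAState roles).2.getD x 0) a
                < (fun x => (pvAState roles).2.getD x 0) b))) b a) = true) := by
    refine hOrdIdx.imp ?_
    intro a b hab
    rcases Nat.lt_trichotomy ((roles.map pvNorm).count a) ((roles.map pvNorm).count b) with h | h | h
    · right
      exact (hbf_iff b a).mpr (Or.inl h)
    · left
      exact (hbf_iff a b).mpr (Or.inr ⟨h, hab⟩)
    · left
      exact (hbf_iff a b).mpr (Or.inl h)
  have htot := List.Pairwise.forall (fun {a b} h => Or.symm h) hS
  have hApair := pv_foldl_insertBy_pairwise _ hbf_trans (PySem.Set.ofList (roles.map pvNorm)) []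
    hOrdNodup List.Pairwise.nil
    (by intro x _ y hy; cases hy)
    (by intro x hx y hy hxy; exact htot hx hy hxy)
  have hApairR : (role_hist_py roles).Pairwise
      (pvR (fun r => (roles.map pvNorm).count r) (fun r => (pvAState roles).2.getD r 0)) := by
    rw [hAform]
    exact hApair.imp (fun {a b} h => (hbf_iff a b).mp h)
  have hAperm : (role_hist_py roles).Perm (PySem.Set.ofList (roles.map pvNorm)) := by
    have h := PySem.List.sorted2_perm (pvAState roles).1.keys
      (fun x => -((pvAState roles).1.getD x 0)) (fun x => (pvAState roles).2.getD x 0) false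
    have h' : (role_hist_py roles).Perm ((pvAState roles).1.keys) := h
    rw [hOrd] at h'
    exact h'
  -- B's side: permutation and order
  have hpos : ∀ r ∈ PySem.Set.ofList (roles.map pvNorm), 1 ≤ (roles.map pvNorm).count r := by
    intro r hr
    exact List.count_pos_iff.mpr ((PySem.Set.mem_ofList (roles.map pvNorm) r).mp hr)
  obtain ⟨hBperm, hBpairR⟩ := pv_out_spec (roles.map pvNorm) (PySem.Set.ofList (roles.map pvNorm))
    (fun r => (pvAState roles).2.getD r 0) hpos hOrdIdx (pvM roles).toNat
  have hBfilter : (PySem.Set.ofList (roles.map pvNorm)).filter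
      (fun r => decide ((roles.map pvNorm).count r ≤ (pvM roles).toNat))
      = PySem.Set.ofList (roles.map pvNorm) :=
    List.filter_eq_self.mpr (fun a ha => by simpa using hcntle a ha)
  rw [hBfilter] at hBperm
  -- assemble
  have hfinal : role_hist_py roles
      = pvOut (roles.map pvNorm) (PySem.Set.ofList (roles.map pvNorm)) (pvM roles).toNat :=
    pv_eq_of_perm_pairwise _ (pvR_asym _ _) _ _
      (hAperm.trans hBperm.symm) hApairR hBpairR
  rw [hBout]
  exact hfinal

-- ===== VERDICT (by name: the statement is the Claim_ definition above) =====
theorem role_hist_py_spec : Claim_equal_role_hist_py := by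
  intro roles _
  unfold Spec_role_hist_py
  exact pv_main roles
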